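-- pv_equiv track=rewrite | github.com/prototype109/cs-module-project-algorithms | product_of_all_other_numbers/product_of_all_other_numbers.py | reduce_multiply_arr
-- ===== SOURCE A (Python) =====
-- def reduce_multiply_arr(arr):
--     num = 1
--
--     zero_index = []
--
--     for index, x in enumerate(arr):
--         if x == 0:
--             zero_index.append(index)
--         else:
--             num *= x
--
--     return (num, zero_index)
-- ===== SOURCE B (Python) =====
-- def reduce_multiply_arr(arr):
--     # Divide and conquer over index ranges: combine (product, zero-index list)
--     # of the two halves; multiplication is associative so the product agrees
--     # and zero indices are absolute, so concatenation keeps them in order.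
--     def go(lo, hi):
--         if hi - lo == 0:
--             return (1, [])
--         if hi - lo == 1:
--             x = arr[lo]
--             return (1, [lo]) if x == 0 else (x, [])
--         mid = (lo + hi) // 2
--         p1, z1 = go(lo, mid)
--         p2, z2 = go(mid, hi)
--         return (p1 * p2, z1 + z2)
--     return go(0, len(arr))
-- ===== Notes on version B (the rewrite author's own statement) =====
-- stated objective: alternative
-- what changed: Replaces A's single left-to-right accumulating loop by a divide-and-conquer recursion over index ranges that combines (product, zero-index list) of the two halves.
import Mathlib
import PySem

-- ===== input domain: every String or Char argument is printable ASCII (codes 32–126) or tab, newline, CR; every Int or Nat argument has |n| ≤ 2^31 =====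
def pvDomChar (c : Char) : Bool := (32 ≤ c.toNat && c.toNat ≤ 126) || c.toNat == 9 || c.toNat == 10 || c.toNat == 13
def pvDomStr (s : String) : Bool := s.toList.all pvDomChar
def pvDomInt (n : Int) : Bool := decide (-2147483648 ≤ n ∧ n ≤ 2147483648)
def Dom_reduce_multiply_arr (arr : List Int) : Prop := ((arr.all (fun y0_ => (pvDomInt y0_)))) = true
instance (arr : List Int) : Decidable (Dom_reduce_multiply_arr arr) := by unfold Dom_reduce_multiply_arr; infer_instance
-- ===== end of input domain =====

-- B replaces A's single accumulating loop by a divide-and-conquer recursion over index ranges; alternative decomposition, same cost.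

-- ===== PORT A =====
-- literal transliteration of A's single loop over enumerate(arr) with state (num, zero_index)
def reduce_multiply_arr (arr : List Int) : Int × List Int :=
  (PySem.List.enumerate arr).foldl
    (fun st p => if p.2 == 0 then (st.1, st.2 ++ [p.1]) else (st.1 * p.2, st.2))
    (1, [])

-- ===== PORT B =====
-- Source B's recursive helper go(lo, hi) on half-open index ranges.
-- arr[lo] is ported as arr.getD lo 0: exact here, since go only reads lo with lo < len(arr).
def rmGo (arr : List Int) (lo hi : Nat) : Int × List Int :=
  if hi - lo = 0 then (1, [])
  else if hi - lo = 1 then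
    (if arr.getD lo 0 == 0 then (1, [(lo : Int)]) else (arr.getD lo 0, []))
  else
    let mid := (lo + hi) / 2
    let l := rmGo arr lo mid
    let r := rmGo arr mid hi
    (l.1 * r.1, l.2 ++ r.2)
termination_by hi - lo
decreasing_by all_goals omega

def reduce_multiply_arr_alt (arr : List Int) : Int × List Int := rmGo arr 0 arr.length

-- ===== PRECONDITION & SPEC =====
def Spec_reduce_multiply_arr (arr : List Int) (out : Int × List Int) : Prop := out = reduce_multiply_arr_alt arr
instance (arr : List Int) (out : Int × List Int) : Decidable (Spec_reduce_multiply_arr arr out) := by unfold Spec_reduce_multiply_arr; infer_instance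

-- ===== CLAIM (what is proved, stated in full; the proofs are below) =====
def Claim_equal_reduce_multiply_arr : Prop := ∀ (arr : List Int), Dom_reduce_multiply_arr arr → Spec_reduce_multiply_arr arr (reduce_multiply_arr arr)

-- ===== LEMMAS AND PROOFS =====

-- the combined (product of nonzeros, zero indices) value of an enumerated segment
def rmF (l : List (Int × Int)) : Int × List Int :=
  (((l.map (·.2)).filter (fun x => !(x == 0))).prod,
   (l.filter (fun p => p.2 == 0)).map (·.1))

lemma rmF_append (l₁ l₂ : List (Int × Int)) :
    rmF (l₁ ++ l₂) = ((rmF l₁).1 * (rmF l₂).1, (rmF l₁).2 ++ (rmF l₂).2) := by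
  simp [rmF]

-- loop invariant for A's fold
lemma foldA_inv (l : List (Int × Int)) (n : Int) (zs : List Int) :
    l.foldl (fun st p => if p.2 == 0 then (st.1, st.2 ++ [p.1]) else (st.1 * p.2, st.2)) (n, zs)
      = (n * (rmF l).1, zs ++ (rmF l).2) := by
  induction l generalizing n zs with
  | nil => simp [rmF]
  | cons h t ih =>
    by_cases hz : h.2 = 0
    · simp only [List.foldl, hz, beq_self_eq_true, if_pos, ih]
      simp [rmF, hz]
    · have hb : (h.2 == 0) = false := by simp [hz]
      simp only [List.foldl, hb, Bool.false_eq_true, if_false, ih]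
      simp [rmF, hb, List.filter, mul_assoc]

-- B's recursion computes rmF of the corresponding enumerate segment
lemma rmGo_eq_rmF (arr : List Int) (lo hi : Nat) (hhi : hi ≤ arr.length) :
    rmGo arr lo hi = rmF (((PySem.List.enumerate arr).drop lo).take (hi - lo)) := by
  have base : ∀ lo' (hlo : lo' < arr.length),
      ((PySem.List.enumerate arr).drop lo').take 1 = [((lo' : Int), arr[lo'])] := by
    intro lo' hlo
    have hloe : lo' < (PySem.List.enumerate arr).length := by
      simpa [PySem.List.length_enumerate] using hlo
    rw [List.drop_eq_getElem_cons hloe]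
    simp only [List.take_succ_cons, List.take_zero]
    rw [PySem.List.getElem_enumerate]
    norm_num
  fun_induction rmGo arr lo hi with
  | case1 lo hi h0 =>
    rw [h0]
    simp [rmF]
  | case2 lo hi h0 h1 hz =>
    have hlo : lo < arr.length := by omega
    have hget : arr.getD lo 0 = arr[lo] := by simp [List.getD_eq_getElem?_getD, hlo]
    rw [h1, base lo hlo]
    rw [hget] at hz
    simp [rmF, of_decide_eq_true hz]
  | case3 lo hi h0 h1 hz =>
    have hlo : lo < arr.length := by omega
    have hget : arr.getD lo 0 = arr[lo] := by simp [List.getD_eq_getElem?_getD, hlo]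
    rw [h1, base lo hlo]
    rw [hget] at hz ⊢
    have hb : (arr[lo] == 0) = false := by simpa using hz
    simp [rmF, hb]
  | case4 lo hi h0 h1 mid l r ihl ihr =>
    have hm : mid = (lo + hi) / 2 := rfl
    have hml : mid ≤ arr.length := by omega
    have hsplit : (hi - lo) = (mid - lo) + (hi - mid) := by omega
    show ((rmGo arr lo mid).1 * (rmGo arr mid hi).1,
          (rmGo arr lo mid).2 ++ (rmGo arr mid hi).2)
        = rmF (((PySem.List.enumerate arr).drop lo).take (hi - lo))
    rw [hsplit, List.take_add, rmF_append]
    rw [List.drop_drop]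
    have h2 : lo + (mid - lo) = mid := by omega
    rw [h2, ihl hml, ihr hhi]

-- ===== VERDICT (by name: the statement is the Claim_ definition above) =====
theorem reduce_multiply_arr_spec : Claim_equal_reduce_multiply_arr := by
  intro arr _
  unfold Spec_reduce_multiply_arr reduce_multiply_arr reduce_multiply_arr_alt
  rw [foldA_inv, rmGo_eq_rmF arr 0 arr.length le_rfl]
  rw [Nat.sub_zero, List.drop_zero, ← PySem.List.length_enumerate arr, List.take_length]
  simp
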